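-- pv_equiv track=rewrite | github.com/starplatinum3/starp-util | strUtil/strUtil.py | turn_param_style
-- ===== SOURCE A (Python) =====
-- def turn_param_style(params: dict):
--     '''
--     将参数名的驼峰形式转为下划线形式
--     @param params:
--     @return:
--     '''
--     temp_dict = {}
--     for name, value in params.items():
--         new_name = ""
--         name += " "  # 为了防止数据溢出
--         for i in range(len(name) - 1):
--             if i == 0:
--                 new_name += name[i]
--             elif name[i].isupper() and name[i - 1].islower():
--                 new_name += "_" + name[i]
--             # 如果不在前面加上name += " "，这里会索引越界
--             elif name[i].isupper() and name[i - 1].isupper() and name[i + 1].islower():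
--                 new_name += "_" + name[i]
--             else:
--                 new_name += name[i]
--         temp_dict.update({new_name: value})
--
--     return temp_dict
-- ===== SOURCE B (Python) =====
-- def turn_param_style(params: dict):
--     '''
--     将参数名的驼峰形式转为下划线形式 (index-building pass + slice-and-join)
--     '''
--     def snake(name):
--         n = len(name)
--         cuts = [i for i in range(1, n)
--                 if name[i].isupper()
--                 and (name[i - 1].islower()
--                      or (name[i - 1].isupper() and i + 1 < n and name[i + 1].islower()))]
--         return "_".join(name[a:b] for a, b in zip([0] + cuts, cuts + [n]))
--
--     return {snake(name): value for name, value in params.items()}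
-- ===== Notes on version B (the rewrite author's own statement) =====
-- stated objective: alternative
-- what changed: Per key, B collects the list of underscore cut indices in one scan and rebuilds the key by slicing the original string at those indices and joining with '_', replacing A's char-by-char accumulate loop with prev/next lookups; the dict is built by a comprehension.
import Mathlib
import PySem

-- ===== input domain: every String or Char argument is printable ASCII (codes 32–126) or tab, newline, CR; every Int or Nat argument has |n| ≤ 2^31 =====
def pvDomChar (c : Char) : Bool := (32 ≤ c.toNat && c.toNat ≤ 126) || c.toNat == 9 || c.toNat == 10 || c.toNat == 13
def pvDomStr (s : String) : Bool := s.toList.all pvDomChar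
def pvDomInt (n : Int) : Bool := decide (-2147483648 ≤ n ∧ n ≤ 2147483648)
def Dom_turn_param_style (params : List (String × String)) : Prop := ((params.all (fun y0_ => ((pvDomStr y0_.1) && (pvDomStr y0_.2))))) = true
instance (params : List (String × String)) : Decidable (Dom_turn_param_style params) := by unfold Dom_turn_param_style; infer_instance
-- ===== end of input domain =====

-- B re-implements the camelCase→snake_case key conversion by collecting the cut indices in one
-- pass and slicing-and-joining the key, instead of A's char-by-char accumulate loop (objective:
-- alternative decomposition, same cost).

-- ===== PORT A =====
-- A's inner per-key loop (name += " "; for i in range(len(name) - 1): …), on the code points.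
def pvAConvChars (cs : List Char) : List Char :=
  let name : List Char := cs ++ [' ']        -- name += " "
  (PySem.List.pyRange 0 ((name.length : Int) - 1) 1).foldl
    (fun acc i =>
      if i == 0 then acc ++ [PySem.List.pyGetD name i ' ']
      else if PySem.Chars.isupper (PySem.List.pyGetD name i ' ') &&
              PySem.Chars.islower (PySem.List.pyGetD name (i - 1) ' ') then
        acc ++ '_' :: [PySem.List.pyGetD name i ' ']
      else if PySem.Chars.isupper (PySem.List.pyGetD name i ' ') &&
              PySem.Chars.isupper (PySem.List.pyGetD name (i - 1) ' ') &&
              PySem.Chars.islower (PySem.List.pyGetD name (i + 1) ' ') then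
        acc ++ '_' :: [PySem.List.pyGetD name i ' ']
      else acc ++ [PySem.List.pyGetD name i ' ']) []

def turn_param_style (params : List (String × String)) : List (String × String) :=
  (params.foldl
    (fun temp_dict p => temp_dict.insert (String.ofList (pvAConvChars p.1.toList)) p.2)
    PySem.Dict.empty).items

-- ===== PORT B =====
-- B's snake(name): one pass collecting the cut indices, then slice-and-join.
def pvSnakeChars (cs : List Char) : List Char :=
  let n : Int := (cs.length : Int)
  let cuts : List Int :=
    (PySem.List.pyRange 1 n 1).filter (fun i =>
      PySem.Chars.isupper (PySem.List.pyGetD cs i ' ') &&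
      (PySem.Chars.islower (PySem.List.pyGetD cs (i - 1) ' ') ||
       (PySem.Chars.isupper (PySem.List.pyGetD cs (i - 1) ' ') &&
        decide (i + 1 < n) &&
        PySem.Chars.islower (PySem.List.pyGetD cs (i + 1) ' '))))
  PySem.Chars.join ['_']
    (((0 :: cuts).zip (cuts ++ [n])).map (fun ab => PySem.List.slice cs (some ab.1) (some ab.2)))

def turn_param_style_alt (params : List (String × String)) : List (String × String) :=
  (PySem.Dict.ofList (params.map (fun p => (String.ofList (pvSnakeChars p.1.toList), p.2)))).items

-- ===== PRECONDITION & SPEC =====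
def Spec_turn_param_style (params : List (String × String)) (out : List (String × String)) : Prop := out = turn_param_style_alt params
instance (params : List (String × String)) (out : List (String × String)) : Decidable (Spec_turn_param_style params out) := by unfold Spec_turn_param_style; infer_instance

-- ===== CLAIM (what is proved, stated in full; the proofs are below) =====
def Claim_equal_turn_param_style : Prop := ∀ (params : List (String × String)), Dom_turn_param_style params → Spec_turn_param_style params (turn_param_style params)

-- ===== LEMMAS AND PROOFS =====

def pvCut (cs : List Char) (k : Nat) : Bool :=
  (PySem.Chars.isupper (cs.getD k ' ') && PySem.Chars.islower (cs.getD (k - 1) ' ')) ||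
  (PySem.Chars.isupper (cs.getD k ' ') && (PySem.Chars.isupper (cs.getD (k - 1) ' ') &&
   PySem.Chars.islower (cs.getD (k + 1) ' ')))

theorem pvGetD_append_space (cs : List Char) (k : Nat) :
    (cs ++ [' ']).getD k ' ' = cs.getD k ' ' := by
  unfold List.getD
  rcases Nat.lt_trichotomy k cs.length with h | h | h
  · rw [List.getElem?_append_left h]
  · subst h
    rw [List.getElem?_append_right (le_refl _), List.getElem?_eq_none (le_refl _)]
    simp
  · rw [List.getElem?_eq_none (by simp; omega), List.getElem?_eq_none (le_of_lt h)]

theorem pvFlatten_singletons {α β : Type} (f : α → β) (l : List α) :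
    (l.map (fun x => [f x])).flatten = l.map f := by
  induction l with
  | nil => rfl
  | cons x t ih => simp [ih]

theorem pvPiece_eq_map (cs : List Char) :
    ∀ (m a : Nat), a + m ≤ cs.length →
      (cs.drop a).take m = (List.range' a m).map (fun k => cs.getD k ' ') := by
  intro m
  induction m with
  | zero => intro a _; simp
  | succ m ih =>
    intro a ha
    have hlt : a < cs.length := by omega
    rw [List.drop_eq_getElem_cons hlt, List.range'_succ, List.map_cons, List.take_succ_cons,
        ih (a + 1) (by omega), List.getD_eq_getElem cs ' ' hlt]

theorem pvJoin_eq_flatMap (cs : List Char) :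
    ∀ (cuts : List Nat) (a : Nat), a ≤ cs.length →
      (a :: cuts).Pairwise (· < ·) → (∀ c ∈ cuts, c < cs.length) →
      PySem.Chars.join ['_']
        (((a :: cuts).zip (cuts ++ [cs.length])).map
          (fun ab => (cs.drop ab.1).take (ab.2 - ab.1)))
      = (List.range' a (cs.length - a)).flatMap
          (fun k => if k ∈ cuts then '_' :: [cs.getD k ' '] else [cs.getD k ' ']) := by
  intro cuts
  induction cuts with
  | nil =>
    intro a ha _ _
    simp only [List.zip_cons_cons, List.nil_append, List.zip_nil_right]
    rw [List.map_cons, List.map_nil, PySem.Chars.join_singleton,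
        pvPiece_eq_map cs (cs.length - a) a (by omega)]
    simp only [List.not_mem_nil, if_false, List.flatMap_def, pvFlatten_singletons]
  | cons c rest ih =>
    intro a ha hpw hbd
    have hac : a < c := (List.pairwise_cons.mp hpw).1 c (by simp)
    have hpw' : (c :: rest).Pairwise (· < ·) := (List.pairwise_cons.mp hpw).2
    have hcr : ∀ x ∈ rest, c < x := (List.pairwise_cons.mp hpw').1
    have hcn : c < cs.length := hbd c (by simp)
    rw [show (c :: rest) ++ [cs.length] = c :: (rest ++ [cs.length]) from rfl,
        List.zip_cons_cons, List.map_cons]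
    obtain ⟨q, t, hqt⟩ : ∃ q t,
        ((c :: rest).zip (rest ++ [cs.length])).map
          (fun ab => (cs.drop ab.1).take (ab.2 - ab.1)) = q :: t := by
      obtain ⟨d, ds, hdd⟩ : ∃ d ds, rest ++ [cs.length] = d :: ds := by
        cases rest <;> exact ⟨_, _, rfl⟩
      rw [hdd, List.zip_cons_cons, List.map_cons]
      exact ⟨_, _, rfl⟩
    rw [hqt, PySem.Chars.join_cons_cons, ← hqt,
        ih c (le_of_lt hcn) hpw' (fun x hx => hbd x (by simp [hx]))]
    -- RHS: split the range at c
    have hsplit : List.range' a (cs.length - a)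
        = List.range' a (c - a) ++ List.range' c (cs.length - c) := by
      have h := List.range'_append (s := a) (m := c - a) (n := cs.length - c) (step := 1)
      rw [show a + 1 * (c - a) = c by omega,
          show c - a + (cs.length - c) = cs.length - a by omega] at h
      exact h.symm
    rw [hsplit, List.flatMap_append]
    have h1 : (List.range' a (c - a)).flatMap
        (fun k => if k ∈ c :: rest then '_' :: [cs.getD k ' '] else [cs.getD k ' '])
        = (cs.drop a).take (c - a) := by
      rw [List.flatMap_congr (g := fun k => [cs.getD k ' ']) ?_,
          pvPiece_eq_map cs (c - a) a (by omega)]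
      · simp only [List.flatMap_def, pvFlatten_singletons]
      · intro x hx
        have hxc : x < c := by have := List.mem_range'_1.mp hx; omega
        have hnm : x ∉ c :: rest := by
          simp only [List.mem_cons]
          rintro (rfl | hx2)
          · omega
          · exact absurd (hcr x hx2) (by omega)
        simp [hnm]
    rw [h1]
    have hcsucc : cs.length - c = (cs.length - c - 1) + 1 := by omega
    rw [hcsucc, List.range'_succ, List.flatMap_cons, List.flatMap_cons]
    have hmemc2 : c ∉ rest := fun h => absurd (hcr c h) (by omega)
    rw [if_pos (by simp : c ∈ c :: rest), if_neg hmemc2]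
    rw [List.flatMap_congr
        (f := fun k => if k ∈ rest then '_' :: [cs.getD k ' '] else [cs.getD k ' '])
        (g := fun k => if k ∈ c :: rest then '_' :: [cs.getD k ' '] else [cs.getD k ' '])
        (fun x hx => by
          have hcx : c < x := by have := List.mem_range'_1.mp hx; omega
          have hne : ¬ x = c := by omega
          simp [List.mem_cons, hne])]
    simp

def pvCutsNat (cs : List Char) : List Nat := (List.range' 1 (cs.length - 1)).filter (pvCut cs)

theorem pvMemCutsNat (cs : List Char) (k : Nat) :
    k ∈ pvCutsNat cs ↔ (1 ≤ k ∧ k < 1 + (cs.length - 1) ∧ pvCut cs k = true) := by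
  unfold pvCutsNat
  simp [List.mem_filter, List.mem_range'_1]
  tauto

theorem pvCutsNat_lt (cs : List Char) : ∀ c ∈ pvCutsNat cs, c < cs.length := by
  intro c hc
  have := (pvMemCutsNat cs c).mp hc
  omega

def pvI (k : Nat) : Int := (k : Int)

theorem pvA_eq_flatMap (cs : List Char) :
    pvAConvChars cs = (List.range' 0 cs.length).flatMap
      (fun k => if k ∈ pvCutsNat cs then '_' :: [cs.getD k ' '] else [cs.getD k ' ']) := by
  simp only [pvAConvChars]
  rw [show (fun (acc : List Char) (i : Int) =>
      if i == 0 then acc ++ [PySem.List.pyGetD (cs ++ [' ']) i ' ']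
      else if PySem.Chars.isupper (PySem.List.pyGetD (cs ++ [' ']) i ' ') &&
              PySem.Chars.islower (PySem.List.pyGetD (cs ++ [' ']) (i - 1) ' ') then
        acc ++ '_' :: [PySem.List.pyGetD (cs ++ [' ']) i ' ']
      else if PySem.Chars.isupper (PySem.List.pyGetD (cs ++ [' ']) i ' ') &&
              PySem.Chars.isupper (PySem.List.pyGetD (cs ++ [' ']) (i - 1) ' ') &&
              PySem.Chars.islower (PySem.List.pyGetD (cs ++ [' ']) (i + 1) ' ') then
        acc ++ '_' :: [PySem.List.pyGetD (cs ++ [' ']) i ' ']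
      else acc ++ [PySem.List.pyGetD (cs ++ [' ']) i ' '])
    = (fun acc i => acc ++
      (if i == 0 then [PySem.List.pyGetD (cs ++ [' ']) i ' ']
      else if PySem.Chars.isupper (PySem.List.pyGetD (cs ++ [' ']) i ' ') &&
              PySem.Chars.islower (PySem.List.pyGetD (cs ++ [' ']) (i - 1) ' ') then
        '_' :: [PySem.List.pyGetD (cs ++ [' ']) i ' ']
      else if PySem.Chars.isupper (PySem.List.pyGetD (cs ++ [' ']) i ' ') &&
              PySem.Chars.isupper (PySem.List.pyGetD (cs ++ [' ']) (i - 1) ' ') &&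
              PySem.Chars.islower (PySem.List.pyGetD (cs ++ [' ']) (i + 1) ' ') then
        '_' :: [PySem.List.pyGetD (cs ++ [' ']) i ' ']
      else [PySem.List.pyGetD (cs ++ [' ']) i ' '])) from by
    funext acc i; split_ifs <;> rfl]
  rw [PySem.List.foldl_append_eq_flatMap, List.nil_append,
      show ((cs ++ [' ']).length : Int) - 1 = (cs.length : Int) by simp,
      PySem.List.pyRange_one 0 (cs.length : Int), List.flatMap_map]
  rw [show ((cs.length : Int) - 0).toNat = cs.length by omega, List.range_eq_range']
  apply List.flatMap_congr
  intro k hk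
  have hk' : k < cs.length := by
    have := List.mem_range'_1.mp hk; omega
  have G : ∀ j : Nat, PySem.List.pyGetD (cs ++ [' ']) ((j : Nat) : Int) ' ' = cs.getD j ' ' := by
    intro j; rw [PySem.List.pyGetD_natCast]; exact pvGetD_append_space cs j
  rw [zero_add]
  by_cases hk0 : k = 0
  · subst hk0
    rw [if_pos (by simp), if_neg (by rw [pvMemCutsNat]; omega)]
    rw [show ((0:Nat) : Int) = (0:Int) by simp] at *
    rw [show PySem.List.pyGetD (cs ++ [' ']) (0:Int) ' ' = cs.getD 0 ' ' from by
      rw [show (0:Int) = ((0:Nat):Int) by simp]; exact G 0]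
  · rw [if_neg (by simp [hk0]),
        show ((k : Int) - 1) = (((k - 1 : Nat)) : Int) by omega,
        show ((k : Int) + 1) = (((k + 1 : Nat)) : Int) by omega,
        G k, G (k - 1), G (k + 1)]
    have hmem : (k ∈ pvCutsNat cs) ↔ (pvCut cs k = true) := by
      rw [pvMemCutsNat]; constructor
      · tauto
      · intro h; exact ⟨by omega, by omega, h⟩
    rw [if_congr hmem rfl rfl]
    simp only [pvCut]
    rcases Bool.eq_false_or_eq_true (PySem.Chars.isupper (cs.getD k ' ')) with h1 | h1 <;>
      rcases Bool.eq_false_or_eq_true (PySem.Chars.islower (cs.getD (k - 1) ' ')) with h2 | h2 <;>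
      rcases Bool.eq_false_or_eq_true (PySem.Chars.isupper (cs.getD (k - 1) ' ')) with h3 | h3 <;>
      rcases Bool.eq_false_or_eq_true (PySem.Chars.islower (cs.getD (k + 1) ' ')) with h4 | h4 <;>
      (simp only [h1, h2, h3, h4]; simp)

theorem pvB_eq_flatMap (cs : List Char) :
    pvSnakeChars cs = (List.range' 0 cs.length).flatMap
      (fun k => if k ∈ pvCutsNat cs then '_' :: [cs.getD k ' '] else [cs.getD k ' ']) := by
  simp only [pvSnakeChars]
  have hcuts :
      (PySem.List.pyRange 1 (cs.length : Int) 1).filter (fun i =>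
        PySem.Chars.isupper (PySem.List.pyGetD cs i ' ') &&
        (PySem.Chars.islower (PySem.List.pyGetD cs (i - 1) ' ') ||
         (PySem.Chars.isupper (PySem.List.pyGetD cs (i - 1) ' ') &&
          decide (i + 1 < (cs.length : Int)) &&
          PySem.Chars.islower (PySem.List.pyGetD cs (i + 1) ' '))))
      = (pvCutsNat cs).map pvI := by
    rw [PySem.List.pyRange_one 1 (cs.length : Int),
        show ((cs.length : Int) - 1).toNat = cs.length - 1 by omega,
        List.filter_map,
        show pvCutsNat cs
          = ((List.range (cs.length - 1)).filter (fun k => pvCut cs (1 + k))).map (fun k => 1 + k) from by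
          unfold pvCutsNat
          rw [List.range'_eq_map_range, List.filter_map]
          rfl,
        List.map_map]
    rw [List.filter_congr (q := fun k => pvCut cs (1 + k)) ?_]
    · apply List.map_congr_left
      intro k _
      simp only [Function.comp_apply, pvI]
      push_cast
      ring
    · intro k hk
      have hkn : k < cs.length - 1 := List.mem_range.mp hk
      simp only [Function.comp_apply]
      have e1 : (1 : Int) + (k : Int) = (((1 + k : Nat)) : Int) := by push_cast; ring
      have e2 : (1 : Int) + (k : Int) - 1 = ((k : Nat) : Int) := by norm_num
      have e3 : (1 : Int) + (k : Int) + 1 = (((k + 2 : Nat)) : Int) := by push_cast; ring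
      rw [e2, e3, e1, PySem.List.pyGetD_natCast, PySem.List.pyGetD_natCast,
          PySem.List.pyGetD_natCast]
      have e4 : (decide (((k + 2 : Nat) : Int) < (cs.length : Int)))
          = decide (k + 2 < cs.length) := by
        simp only [decide_eq_decide]; push_cast; omega
      rw [e4]
      simp only [pvCut, show (1 + k) - 1 = k by omega, show (1 + k) + 1 = k + 2 by omega]
      by_cases h2 : k + 2 < cs.length
      · rw [decide_eq_true h2]
        rcases Bool.eq_false_or_eq_true (PySem.Chars.isupper (cs.getD (1 + k) ' ')) with h1 | h1 <;>
          rcases Bool.eq_false_or_eq_true (PySem.Chars.islower (cs.getD k ' ')) with hb | hb <;>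
          rcases Bool.eq_false_or_eq_true (PySem.Chars.isupper (cs.getD k ' ')) with hc | hc <;>
          rcases Bool.eq_false_or_eq_true (PySem.Chars.islower (cs.getD (k + 2) ' ')) with hd | hd <;>
          (simp only [h1, hb, hc, hd]; simp)
      · have hlow : PySem.Chars.islower (cs.getD (k + 2) ' ') = false := by
          rw [List.getD_eq_default _ _ (by omega)]
          decide
        rw [decide_eq_false h2, hlow]
        rcases Bool.eq_false_or_eq_true (PySem.Chars.isupper (cs.getD (1 + k) ' ')) with h1 | h1 <;>
          rcases Bool.eq_false_or_eq_true (PySem.Chars.islower (cs.getD k ' ')) with hb | hb <;>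
          rcases Bool.eq_false_or_eq_true (PySem.Chars.isupper (cs.getD k ' ')) with hc | hc <;>
          (simp only [h1, hb, hc]; simp)
  rw [hcuts,
      show ((0 : Int) :: (pvCutsNat cs).map pvI) = ((0 :: pvCutsNat cs).map pvI) from by
        rw [List.map_cons]; rfl,
      show ((pvCutsNat cs).map pvI ++ [(cs.length : Int)]) = ((pvCutsNat cs ++ [cs.length]).map pvI) from by
        rw [List.map_append]; rfl,
      List.zip_map, List.map_map]
  rw [List.map_congr_left
      (g := fun ab : Nat × Nat => (cs.drop ab.1).take (ab.2 - ab.1))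
      (fun ab _ => by
        simp only [Function.comp_apply, Prod.map, pvI]
        rw [PySem.List.slice_natCast])]
  have hpw : (0 :: pvCutsNat cs).Pairwise (· < ·) := by
    rw [List.pairwise_cons]
    constructor
    · intro c hc; have := (pvMemCutsNat cs c).mp hc; omega
    · exact (List.pairwise_lt_range' 1).filter _
  rw [pvJoin_eq_flatMap cs (pvCutsNat cs) 0 (by omega) hpw (pvCutsNat_lt cs), Nat.sub_zero]

theorem pvConv_eq (cs : List Char) : pvAConvChars cs = pvSnakeChars cs := by
  rw [pvA_eq_flatMap, pvB_eq_flatMap]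

theorem pv_main (params : List (String × String)) :
    turn_param_style params = turn_param_style_alt params := by
  have hfun : (fun (d : PySem.Dict String String) (p : String × String) =>
        d.insert (String.ofList (pvAConvChars p.1.toList)) p.2)
      = (fun (d : PySem.Dict String String) (p : String × String) =>
        d.insert (String.ofList (pvSnakeChars p.1.toList)) p.2) := by
    funext d p; rw [pvConv_eq]
  have h1 : PySem.Dict.ofList (params.map (fun p => (String.ofList (pvSnakeChars p.1.toList), p.2)))
      = params.foldl (fun (d : PySem.Dict String String) p =>
          d.insert (String.ofList (pvSnakeChars p.1.toList)) p.2) PySem.Dict.empty := by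
    rw [show PySem.Dict.ofList (params.map (fun p => (String.ofList (pvSnakeChars p.1.toList), p.2)))
          = (params.map (fun p => (String.ofList (pvSnakeChars p.1.toList), p.2))).foldl
              (fun d p => d.insert p.1 p.2) PySem.Dict.empty from rfl,
        List.foldl_map]
  unfold turn_param_style turn_param_style_alt
  rw [h1, hfun]

-- ===== VERDICT (by name: the statement is the Claim_ definition above) =====
theorem turn_param_style_spec : Claim_equal_turn_param_style := by
  intro params _
  unfold Spec_turn_param_style
  exact pv_main params
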